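-- pv_equiv track=rewrite | github.com/H0r4c3/Challenges | HackerEarth_Challenges/easy_sum_set_problem.py | easy_sum
-- ===== SOURCE A (Python) =====
-- def easy_sum(A, B, C):
--     D = set()
--     for item1 in A:
--         for item2 in C:
--             B.add(item2 - item1)
--     for item1 in A:
--         for item3 in B:
--             if (item1 + item3) not in C:
--                 D.add(item3)
--     B = B - D
--     result = sorted(B)
--
--     return result
-- ===== SOURCE B (Python) =====
-- def easy_sum(A, B, C):
--     # Mutates B exactly like A does (adds every c - a); equivalence is about the return value.
--     for a in A:
--         B.update(c - a for c in C)
--     if not A: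
--         return sorted(B)
--     a0, *rest = A
--     valid = {c - a0 for c in C}
--     for a in rest:
--         valid &= {c - a for c in C}
--     return sorted(valid)
-- ===== Notes on version B (the rewrite author's own statement) =====
-- stated objective: faster
-- what changed: Instead of augmenting B and then scanning the whole augmented set against C for every a to build a discard set D, B keeps a running intersection of the translated sets {c-a : c in C} (identical to A's kept set when A is nonempty, and sorted(B) when A is empty), never revisiting the augmented B.
import Mathlib
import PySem

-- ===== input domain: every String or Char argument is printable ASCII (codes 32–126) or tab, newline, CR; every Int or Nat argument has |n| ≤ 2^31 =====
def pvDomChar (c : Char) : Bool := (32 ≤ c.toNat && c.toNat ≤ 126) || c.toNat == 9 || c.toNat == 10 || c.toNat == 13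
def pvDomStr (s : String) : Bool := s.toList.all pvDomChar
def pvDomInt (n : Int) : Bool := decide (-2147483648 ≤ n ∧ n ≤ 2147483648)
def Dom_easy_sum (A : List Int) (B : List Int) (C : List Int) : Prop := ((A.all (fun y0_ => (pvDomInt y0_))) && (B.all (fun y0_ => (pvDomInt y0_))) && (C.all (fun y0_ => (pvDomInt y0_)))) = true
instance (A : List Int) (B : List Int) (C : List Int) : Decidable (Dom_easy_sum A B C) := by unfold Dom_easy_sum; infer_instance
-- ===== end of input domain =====

-- B replaces A's "augment B, then mark and subtract the bad elements D" by a running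
-- intersection of the translated sets {c - a | c in C}; return value only (both Pythons
-- mutate the caller's set B identically).

-- ===== PORT A =====
def easy_sum (A : List Int) (B : List Int) (C : List Int) : List Int :=
  -- for item1 in A: for item2 in C: B.add(item2 - item1)
  let B1 : PySem.Set Int :=
    A.foldl (fun b item1 => C.foldl (fun b item2 => PySem.Set.add b (item2 - item1)) b)
      (PySem.Set.ofList B)
  -- D = set(); for item1 in A: for item3 in B: if (item1 + item3) not in C: D.add(item3)
  let D : PySem.Set Int :=
    A.foldl (fun d item1 =>
      B1.foldl (fun d item3 =>
        if (item1 + item3) ∈ C then d else PySem.Set.add d item3) d)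
      PySem.Set.empty
  -- B = B - D; result = sorted(B)
  PySem.List.sorted (PySem.Set.diff B1 D) (fun x => x) false

-- ===== PORT B =====
def easy_sum_alt (A : List Int) (B : List Int) (C : List Int) : List Int :=
  -- for a in A: B.update(c - a for c in C)
  let B1 : PySem.Set Int :=
    A.foldl (fun b a => PySem.Set.update b (C.map (fun c => c - a))) (PySem.Set.ofList B)
  match A with
  | [] => PySem.List.sorted B1 (fun x => x) false
  | a0 :: rest =>
    -- valid = {c - a0 for c in C}; for a in rest: valid &= {c - a for c in C}
    let valid : PySem.Set Int :=
      rest.foldl (fun v a => PySem.Set.inter v (PySem.Set.ofList (C.map (fun c => c - a))))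
        (PySem.Set.ofList (C.map (fun c => c - a0)))
    PySem.List.sorted valid (fun x => x) false

-- ===== PRECONDITION & SPEC =====
def Spec_easy_sum (A : List Int) (B : List Int) (C : List Int) (out : List Int) : Prop := out = easy_sum_alt A B C
instance (A : List Int) (B : List Int) (C : List Int) (out : List Int) : Decidable (Spec_easy_sum A B C out) := by unfold Spec_easy_sum; infer_instance

-- ===== CLAIM (what is proved, stated in full; the proofs are below) =====
def Claim_equal_easy_sum : Prop := ∀ (A : List Int) (B : List Int) (C : List Int), Dom_easy_sum A B C → Spec_easy_sum A B C (easy_sum A B C)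

-- ===== LEMMAS AND PROOFS =====

-- the augmented B used by both ports is the same fold
theorem aug_eq (A C : List Int) (s : PySem.Set Int) :
    A.foldl (fun b item1 => C.foldl (fun b item2 => PySem.Set.add b (item2 - item1)) b) s
      = A.foldl (fun b a => PySem.Set.update b (C.map (fun c => c - a))) s := by
  induction A generalizing s with
  | nil => rfl
  | cons a A ih =>
      simp only [List.foldl_cons, PySem.Set.update_map_eq_foldl_add, ih]

theorem mem_aug (A C : List Int) (s : PySem.Set Int) (y : Int) :
    y ∈ A.foldl (fun b a => PySem.Set.update b (C.map (fun c => c - a))) s ↔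
      y ∈ s ∨ ∃ a ∈ A, ∃ c ∈ C, y = c - a := by
  induction A generalizing s with
  | nil => simp
  | cons a A ih =>
      simp only [List.foldl_cons, ih, PySem.Set.mem_update, List.mem_map, List.mem_cons]
      constructor
      · rintro (((h | ⟨c, hc, rfl⟩) | h))
        · exact Or.inl h
        · exact Or.inr ⟨a, Or.inl rfl, c, hc, rfl⟩
        · rcases h with ⟨a', ha', c, hc, rfl⟩
          exact Or.inr ⟨a', Or.inr ha', c, hc, rfl⟩
      · rintro (h | ⟨a', (rfl | ha'), c, hc, rfl⟩)
        · exact Or.inl (Or.inl h)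
        · exact Or.inl (Or.inr ⟨c, hc, rfl⟩)
        · exact Or.inr ⟨a', ha', c, hc, rfl⟩

theorem nodup_aug (A C : List Int) (s : PySem.Set Int) (hs : s.Nodup) :
    (A.foldl (fun b a => PySem.Set.update b (C.map (fun c => c - a))) s).Nodup := by
  induction A generalizing s with
  | nil => exact hs
  | cons a A ih =>
      simp only [List.foldl_cons]
      exact ih _ (PySem.Set.nodup_update _ _ hs)

theorem mem_D_inner (B1 C : List Int) (a : Int) (d : PySem.Set Int) (y : Int) :
    y ∈ B1.foldl (fun d item3 =>
        if (a + item3) ∈ C then d else PySem.Set.add d item3) d ↔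
      y ∈ d ∨ (y ∈ B1 ∧ (a + y) ∉ C) := by
  induction B1 generalizing d with
  | nil => simp
  | cons b B1 ih =>
      simp only [List.foldl_cons, List.mem_cons]
      by_cases hb : (a + b) ∈ C
      · rw [if_pos hb, ih]
        constructor
        · rintro (h | ⟨hB, hC⟩)
          · exact Or.inl h
          · exact Or.inr ⟨Or.inr hB, hC⟩
        · rintro (h | ⟨(rfl | hB), hC⟩)
          · exact Or.inl h
          · exact absurd hb hC
          · exact Or.inr ⟨hB, hC⟩
      · rw [if_neg hb, ih]
        simp only [PySem.Set.mem_add]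
        constructor
        · rintro ((h | rfl) | ⟨hB, hC⟩)
          · exact Or.inl h
          · exact Or.inr ⟨Or.inl rfl, hb⟩
          · exact Or.inr ⟨Or.inr hB, hC⟩
        · rintro (h | ⟨(rfl | hB), hC⟩)
          · exact Or.inl (Or.inl h)
          · exact Or.inl (Or.inr rfl)
          · exact Or.inr ⟨hB, hC⟩

theorem mem_D (A B1 C : List Int) (d : PySem.Set Int) (y : Int) :
    y ∈ A.foldl (fun d item1 =>
        B1.foldl (fun d item3 =>
          if (item1 + item3) ∈ C then d else PySem.Set.add d item3) d) d ↔
      y ∈ d ∨ ∃ a ∈ A, y ∈ B1 ∧ (a + y) ∉ C := by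
  induction A generalizing d with
  | nil => simp
  | cons a A ih =>
      simp only [List.foldl_cons, ih, mem_D_inner, List.mem_cons]
      constructor
      · rintro ((h | h) | ⟨a', ha', h⟩)
        · exact Or.inl h
        · exact Or.inr ⟨a, Or.inl rfl, h⟩
        · exact Or.inr ⟨a', Or.inr ha', h⟩
      · rintro (h | ⟨a', (rfl | ha'), h⟩)
        · exact Or.inl (Or.inl h)
        · exact Or.inl (Or.inr h)
        · exact Or.inr ⟨a', ha', h⟩

theorem mem_valid (rest C : List Int) (v : PySem.Set Int) (y : Int) :
    y ∈ rest.foldl (fun v a => PySem.Set.inter v (PySem.Set.ofList (C.map (fun c => c - a)))) v ↔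
      y ∈ v ∧ ∀ a ∈ rest, ∃ c ∈ C, y = c - a := by
  induction rest generalizing v with
  | nil => simp
  | cons a rest ih =>
      simp only [List.foldl_cons, ih, PySem.Set.mem_inter, PySem.Set.mem_ofList,
        List.mem_map, List.mem_cons, eq_comm]
      constructor
      · rintro ⟨⟨hv, hc⟩, hrest⟩
        refine ⟨hv, ?_⟩
        rintro a' (rfl | ha')
        · exact hc
        · exact hrest a' ha'
      · rintro ⟨hv, hall⟩
        exact ⟨⟨hv, hall a (Or.inl rfl)⟩, fun a' ha' => hall a' (Or.inr ha')⟩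

theorem nodup_valid (rest C : List Int) (v : PySem.Set Int) (hv : v.Nodup) :
    (rest.foldl (fun v a => PySem.Set.inter v (PySem.Set.ofList (C.map (fun c => c - a)))) v).Nodup := by
  induction rest generalizing v with
  | nil => exact hv
  | cons a rest ih =>
      simp only [List.foldl_cons]
      exact ih _ (PySem.Set.nodup_inter _ _ hv)

theorem trans_mem (y a : Int) (C : List Int) : (∃ c ∈ C, y = c - a) ↔ (a + y) ∈ C := by
  constructor
  · rintro ⟨c, hc, rfl⟩
    have : a + (c - a) = c := by ring
    rwa [this]
  · intro h
    exact ⟨a + y, h, by ring⟩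

theorem trans_mem' (y a : Int) (C : List Int) : (∃ c ∈ C, c - a = y) ↔ (a + y) ∈ C := by
  rw [← trans_mem y a C]
  constructor
  · rintro ⟨c, hc, h⟩; exact ⟨c, hc, h.symm⟩
  · rintro ⟨c, hc, h⟩; exact ⟨c, hc, h.symm⟩

-- ===== VERDICT (by name: the statement is the Claim_ definition above) =====
theorem easy_sum_spec : Claim_equal_easy_sum := by
  unfold Claim_equal_easy_sum Spec_easy_sum
  intro A B C _
  unfold easy_sum easy_sum_alt
  rw [aug_eq]
  cases A with
  | nil =>
      simp only [List.foldl_nil]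
      congr 1
      simp [PySem.Set.diff, PySem.Set.empty]
  | cons a0 rest =>
      simp only []
      -- both results are sorted (no key) of sets with the same members
      rw [PySem.List.sorted_id_eq_sorted_id_iff_perm]
      have hB1 := nodup_aug (a0 :: rest) C (PySem.Set.ofList B) (PySem.Set.nodup_ofList B)
      rw [List.perm_ext_iff_of_nodup (PySem.Set.nodup_diff _ _ hB1)
        (nodup_valid rest C _ (PySem.Set.nodup_ofList _))]
      intro y
      simp only [PySem.Set.mem_diff, mem_D, mem_valid, mem_aug, PySem.Set.mem_ofList,
        List.mem_map, trans_mem, trans_mem', PySem.Set.empty, List.not_mem_nil, false_or,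
        not_exists, not_and, not_not]
      constructor
      · rintro ⟨hmem, hnd⟩
        exact ⟨hnd a0 List.mem_cons_self hmem,
          fun a ha => hnd a (List.mem_cons_of_mem _ ha) hmem⟩
      · rintro ⟨h0, hrest⟩
        refine ⟨Or.inr ⟨a0, List.mem_cons_self, h0⟩, ?_⟩
        intro a ha _
        rcases List.mem_cons.mp ha with rfl | h
        · exact h0
        · exact hrest a h
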